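-- pv_equiv track=rewrite | github.com/uctb/One4All-ST | UCTB/utils/utils_ArbFlow.py | get_all_feasible_strucutre
-- ===== SOURCE A (Python) =====
-- def get_all_feasible_strucutre(max_scale,steps):
--     paths = list()
--     if max_scale<1:
--         return None
--     if max_scale==1:
--         paths.append([1])
--         return paths
--     for step in steps:
--         if max_scale%step != 0:
--             continue
--         tmp_result = get_all_feasible_strucutre(max_scale//step,steps)
--         if tmp_result is None:
--             continue
--         for path in tmp_result:
--             path.append(path[-1]*step)
--         paths.extend(tmp_result)
--     return paths
-- ===== SOURCE B (Python) =====
-- def get_all_feasible_strucutre(max_scale, steps):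
--     # Bottom-up DP over the divisors of max_scale: each divisor's path list is
--     # computed once, from memo entries of smaller divisors.
--     if max_scale < 1:
--         return None
--     if max_scale == 1:
--         return [[1]]
--     # all positive divisors of max_scale, ascending
--     divs = []
--     d = 1
--     while d * d <= max_scale:
--         if max_scale % d == 0:
--             divs.append(d)
--             if d != max_scale // d:
--                 divs.append(max_scale // d)
--         d += 1
--     divs.sort()
--     memo = {1: [[1]]}
--     for v in divs[1:]:
--         acc = []
--         for step in steps:
--             if step >= 2 and v % step == 0:
--                 for p in memo.get(v // step, []):
--                     acc.append(p + [v])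
--         memo[v] = acc
--     return memo[max_scale]
-- ===== Notes on version B (the rewrite author's own statement) =====
-- stated objective: alternative
-- what changed: Replaces A's top-down recursion over max_scale//step by bottom-up dynamic programming: B enumerates the divisors of max_scale by trial division up to sqrt, sorts them, and fills a memo table ascending so each divisor's path list is computed once from already-stored entries; it trades A's repeated sub-recursions for table lookups plus explicit path copying, at the same overall cost (both are dominated by the total output size).
import Mathlib
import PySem

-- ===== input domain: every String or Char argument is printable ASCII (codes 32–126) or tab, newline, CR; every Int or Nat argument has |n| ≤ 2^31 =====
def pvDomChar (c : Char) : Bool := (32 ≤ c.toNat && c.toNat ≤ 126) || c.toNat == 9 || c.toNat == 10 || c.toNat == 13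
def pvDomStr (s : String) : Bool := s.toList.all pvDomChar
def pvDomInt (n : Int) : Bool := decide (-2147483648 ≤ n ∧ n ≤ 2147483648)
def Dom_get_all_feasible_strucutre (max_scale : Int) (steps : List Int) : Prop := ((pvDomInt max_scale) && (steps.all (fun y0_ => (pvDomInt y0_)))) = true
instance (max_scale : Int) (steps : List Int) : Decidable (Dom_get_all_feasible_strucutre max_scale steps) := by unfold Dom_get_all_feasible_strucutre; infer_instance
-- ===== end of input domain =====

-- B replaces A's top-down recursion by bottom-up dynamic programming over the sorted
-- divisors of max_scale (each divisor's path list computed once); objective: alternative.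

-- ===== PORT A =====
-- A recurses on max_scale//step; when 1 ∈ steps that recursion never terminates, so the
-- port carries fuel (max_scale.toNat suffices on Pre_, where every dividing step is ≥ 2;
-- fuel 0 is unreachable there).
def goA (steps : List Int) (fuel : Nat) (m : Int) : Option (List (List Int)) :=
  if m < 1 then none
  else if m = 1 then some [[1]]
  else
    match fuel with
    | 0 => none
    | f + 1 =>
      some (steps.foldl (fun paths step =>
        if PySem.Int.mod m step ≠ 0 then paths
        else
          match goA steps f (PySem.Int.floordiv m step) with
          | none => paths
          -- path.append(path[-1]*step): paths are never empty, the default 0 is unreachable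
          | some tmp => paths ++ tmp.map (fun p => p ++ [PySem.List.pyGetD p (-1) 0 * step])) [])

def get_all_feasible_strucutre (max_scale : Int) (steps : List Int) : Option (List (List Int)) :=
  goA steps max_scale.toNat max_scale

-- ===== PORT B =====
-- `while d * d <= max_scale:` loop collecting the divisors; fuel max_scale.toNat suffices
-- since the loop stops once d * d > max_scale.
def divLoop (m : Int) : Nat → Int → List Int → List Int
  | 0, _, acc => acc
  | f + 1, d, acc =>
    if d * d ≤ m then
      divLoop m f (d + 1)
        (if PySem.Int.mod m d = 0 then
          acc ++ [d] ++
            (if d ≠ PySem.Int.floordiv m d then [PySem.Int.floordiv m d] else [])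
        else acc)
    else acc

def bInner (steps : List Int) (memo : PySem.Dict Int (List (List Int))) (v : Int) :
    List (List Int) :=
  steps.foldl (fun acc step =>
    if 2 ≤ step ∧ PySem.Int.mod v step = 0 then
      acc ++ (memo.getD (PySem.Int.floordiv v step) []).map (fun p => p ++ [v])
    else acc) []

def get_all_feasible_strucutre_alt (max_scale : Int) (steps : List Int) :
    Option (List (List Int)) :=
  if max_scale < 1 then none
  else if max_scale = 1 then some [[1]]
  else
    let divs := PySem.List.sorted (divLoop max_scale max_scale.toNat 1 []) (fun x => x) false
    let memo := (PySem.List.slice divs (some 1) none).foldl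
      (fun memo v => memo.insert v (bInner steps memo v)) (PySem.Dict.ofList [(1, [[1]])])
    -- memo[max_scale]: the key is always present (max_scale divides itself), default unreachable
    some (memo.getD max_scale [])

-- ===== PRECONDITION & SPEC =====
-- Pre_ excludes only inputs where A raises: for max_scale ≥ 2, a step 0 raises
-- ZeroDivisionError and a step 1 makes the recursion unbounded (RecursionError).
def Pre_get_all_feasible_strucutre (max_scale : Int) (steps : List Int) : Prop :=
  max_scale ≤ 1 ∨ ((0 : Int) ∉ steps ∧ (1 : Int) ∉ steps)
instance (max_scale : Int) (steps : List Int) : Decidable (Pre_get_all_feasible_strucutre max_scale steps) := by unfold Pre_get_all_feasible_strucutre; infer_instance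

def pvWitness_get_all_feasible_strucutre : Int × List Int := (12, [2, 3])

def Spec_get_all_feasible_strucutre (max_scale : Int) (steps : List Int) (out : Option (List (List Int))) : Prop := out = get_all_feasible_strucutre_alt max_scale steps
instance (max_scale : Int) (steps : List Int) (out : Option (List (List Int))) : Decidable (Spec_get_all_feasible_strucutre max_scale steps out) := by unfold Spec_get_all_feasible_strucutre; infer_instance

-- ===== CLAIM (what is proved, stated in full; the proofs are below) =====
def Claim_equal_get_all_feasible_strucutre : Prop := ∀ (max_scale : Int) (steps : List Int), Dom_get_all_feasible_strucutre max_scale steps → Pre_get_all_feasible_strucutre max_scale steps → Spec_get_all_feasible_strucutre max_scale steps (get_all_feasible_strucutre max_scale steps)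

-- ===== LEMMAS AND PROOFS =====

-- arithmetic helpers about PySem floordiv/mod

lemma pv_mul_fd (a b : Int) (h : PySem.Int.mod a b = 0) :
    PySem.Int.floordiv a b * b = a := by
  have := PySem.Int.floordiv_mul_add_mod a b
  omega

lemma pv_fd_lt_one_of_neg (m step : Int) (hm : 2 ≤ m) (hs : step ≤ -1) :
    PySem.Int.floordiv m step < 1 := by
  have h := PySem.Int.floordiv_mul_add_mod m step
  have hb := PySem.Int.mod_neg_bounds (a := m) (b := step) (by omega)
  by_contra hq
  push Not at hq
  nlinarith

lemma pv_fd_exact (n d v : Int) (hv : 1 ≤ v) (h : n = d * v) : PySem.Int.floordiv n v = d := by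
  rw [PySem.Int.floordiv_eq_iff_of_pos (by omega)]
  constructor <;> nlinarith

-- goA basics

lemma goA_none_of_lt (steps : List Int) (f : Nat) (m : Int) (h : m < 1) :
    goA steps f m = none := by
  rw [goA.eq_def]; simp [h]

lemma goA_one (steps : List Int) (f : Nat) : goA steps f 1 = some [[1]] := by
  rw [goA.eq_def]; simp

-- per-step contribution of A's loop body, so that the fold becomes a flatMap
def gA (steps : List Int) (f : Nat) (m : Int) (step : Int) : List (List Int) :=
  if PySem.Int.mod m step ≠ 0 then []
  else
    match goA steps f (PySem.Int.floordiv m step) with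
    | none => []
    | some tmp => tmp.map (fun p => p ++ [PySem.List.pyGetD p (-1) 0 * step])

lemma foldA_eq (steps : List Int) (f : Nat) (m : Int) (init : List (List Int)) :
    steps.foldl (fun paths step =>
      if PySem.Int.mod m step ≠ 0 then paths
      else
        match goA steps f (PySem.Int.floordiv m step) with
        | none => paths
        | some tmp => paths ++ tmp.map (fun p => p ++ [PySem.List.pyGetD p (-1) 0 * step])) init
      = init ++ steps.flatMap (gA steps f m) := by
  rw [← PySem.List.foldl_append_eq_flatMap]
  apply PySem.List.foldl_congr_mem
  intro acc x _
  by_cases h : PySem.Int.mod m x ≠ 0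
  · simp [gA, h]
  · cases hgo : goA steps f (PySem.Int.floordiv m x) <;> simp [gA, h, hgo]

lemma goA_ge_two (steps : List Int) (f : Nat) (m : Int) (hm : 2 ≤ m) :
    goA steps (f + 1) m = some (steps.flatMap (gA steps f m)) := by
  rw [goA.eq_def]
  simp only [if_neg (by omega : ¬ m < 1), if_neg (by omega : ¬ m = 1)]
  rw [foldA_eq]
  simp

-- per-step contribution of B's inner loop
def gB (memo : PySem.Dict Int (List (List Int))) (v : Int) (step : Int) : List (List Int) :=
  if 2 ≤ step ∧ PySem.Int.mod v step = 0 then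
    (memo.getD (PySem.Int.floordiv v step) []).map (fun p => p ++ [v])
  else []

lemma bInner_eq (steps : List Int) (memo : PySem.Dict Int (List (List Int))) (v : Int) :
    bInner steps memo v = steps.flatMap (gB memo v) := by
  unfold bInner
  have h : steps.foldl (fun acc step =>
      if 2 ≤ step ∧ PySem.Int.mod v step = 0 then
        acc ++ (memo.getD (PySem.Int.floordiv v step) []).map (fun p => p ++ [v])
      else acc) [] = [] ++ steps.flatMap (gB memo v) := by
    rw [← PySem.List.foldl_append_eq_flatMap]
    apply PySem.List.foldl_congr_mem
    intro acc x _
    by_cases hc : 2 ≤ x ∧ PySem.Int.mod v x = 0 <;> simp [gB, hc]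
  simpa using h

-- every path produced for m ends in m
lemma goA_last (steps : List Int) :
    ∀ (f : Nat) (m : Int) (tmp : List (List Int)), goA steps f m = some tmp →
      ∀ p ∈ tmp, PySem.List.pyGetD p (-1) 0 = m := by
  intro f
  induction f with
  | zero =>
    intro m tmp h p hp
    rw [goA.eq_def] at h
    by_cases h1 : m < 1
    · simp [h1] at h
    by_cases h2 : m = 1
    · subst h2; simp at h; subst h; simp at hp; subst hp; decide
    · simp [h1, h2] at h
  | succ f ih =>
    intro m tmp h p hp
    by_cases h1 : m < 1
    · rw [goA_none_of_lt steps _ m h1] at h; simp at h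
    by_cases h2 : m = 1
    · subst h2; rw [goA_one] at h
      simp at h; subst h; simp at hp; subst hp; decide
    rw [goA_ge_two steps f m (by omega)] at h
    simp only [Option.some.injEq] at h
    subst h
    rw [List.mem_flatMap] at hp
    obtain ⟨step, _, hpg⟩ := hp
    unfold gA at hpg
    by_cases hmod : PySem.Int.mod m step ≠ 0
    · simp [hmod] at hpg
    simp only [hmod, if_false] at hpg
    rcases hgo : goA steps f (PySem.Int.floordiv m step) with _ | tmp'
    · simp [hgo] at hpg
    · rw [hgo] at hpg
      simp only [List.mem_map] at hpg
      obtain ⟨p', hp', rfl⟩ := hpg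
      have hlast := ih (PySem.Int.floordiv m step) tmp' hgo p' hp'
      rw [PySem.List.pyGetD_neg_one_append_singleton, hlast]
      push Not at hmod
      exact pv_mul_fd m step hmod

-- the result of goA does not depend on the fuel once it is at least m.toNat
lemma goA_fuel (steps : List Int) (h0 : (0 : Int) ∉ steps) (h1 : (1 : Int) ∉ steps) :
    ∀ (k : Nat) (m : Int), m.toNat ≤ k → ∀ (f g : Nat), m.toNat ≤ f → m.toNat ≤ g →
      goA steps f m = goA steps g m := by
  intro k
  induction k with
  | zero =>
    intro m hm f g _ _
    rw [goA_none_of_lt steps f m (by omega), goA_none_of_lt steps g m (by omega)]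
  | succ k ih =>
    intro m hm f g hf hg
    by_cases hm1 : m < 1
    · rw [goA_none_of_lt steps f m hm1, goA_none_of_lt steps g m hm1]
    by_cases hm2 : m = 1
    · subst hm2; rw [goA_one, goA_one]
    have hm2' : 2 ≤ m := by omega
    obtain ⟨f', rfl⟩ : ∃ f', f = f' + 1 := ⟨f - 1, by omega⟩
    obtain ⟨g', rfl⟩ : ∃ g', g = g' + 1 := ⟨g - 1, by omega⟩
    rw [goA_ge_two steps f' m hm2', goA_ge_two steps g' m hm2']
    congr 1
    apply List.flatMap_congr
    intro step hstep
    unfold gA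
    by_cases hmod : PySem.Int.mod m step ≠ 0
    · simp [hmod]
    push Not at hmod
    have hs0 : step ≠ 0 := fun h => h0 (h ▸ hstep)
    have hs1 : step ≠ 1 := fun h => h1 (h ▸ hstep)
    rcases (by omega : step ≤ -1 ∨ 2 ≤ step) with hneg | hpos
    · rw [goA_none_of_lt steps f' _ (pv_fd_lt_one_of_neg m step hm2' hneg),
        goA_none_of_lt steps g' _ (pv_fd_lt_one_of_neg m step hm2' hneg)]
    · have hq : PySem.Int.floordiv m step * step = m := pv_mul_fd m step hmod
      set q := PySem.Int.floordiv m step with hqdef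
      have hq1 : 1 ≤ q := by nlinarith
      have hqm : q < m := by nlinarith
      rw [ih q (by omega) f' g' (by omega) (by omega)]

-- divisors loop: membership
lemma divLoop_mem (n : Int) (hn : 2 ≤ n) :
    ∀ (f : Nat) (d : Int) (acc : List Int), 1 ≤ d → n.toNat + 1 ≤ f + d.toNat →
      ∀ v, v ∈ divLoop n f d acc ↔
        v ∈ acc ∨ (1 ≤ v ∧ v ∣ n ∧ d ≤ v ∧ d ≤ PySem.Int.floordiv n v) := by
  intro f
  induction f with
  | zero =>
    intro d acc hd hfuel v
    simp only [divLoop]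
    constructor
    · exact Or.inl
    · rintro (h | ⟨hv1, hdvd, hdv, -⟩)
      · exact h
      · exact absurd (Int.le_of_dvd (by omega) hdvd) (by omega)
  | succ f ih =>
    intro d acc hd hfuel v
    rw [divLoop]
    by_cases hdd : d * d ≤ n
    · rw [if_pos hdd, ih (d + 1) _ (by omega) (by omega)]
      by_cases hmod : PySem.Int.mod n d = 0
      · have hq : PySem.Int.floordiv n d * d = n := pv_mul_fd n d hmod
        set q := PySem.Int.floordiv n d with hqdef
        have hdq : d ≤ q := (PySem.Int.le_floordiv_iff_mul_le (by omega)).2 hdd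
        have hq1 : 1 ≤ q := by nlinarith
        rw [if_pos hmod]
        constructor
        · rintro (hmem | ⟨hv1, hdvd, hdv1, hdf1⟩)
          · rcases List.mem_append.1 hmem with hmem' | hvq
            · rcases List.mem_append.1 hmem' with ha | hvd
              · exact Or.inl ha
              · have hvd' : v = d := by simpa using hvd
                subst hvd'
                exact Or.inr ⟨hd, ⟨q, by rw [← hq]; try ring⟩, le_refl _, hdq⟩
            · have hne : d ≠ q := by
                intro h; rw [if_neg (by simp [h])] at hvq; simp at hvq
              rw [if_pos hne] at hvq
              have hvq' : v = q := by simpa using hvq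
              subst hvq'
              refine Or.inr ⟨hq1, ⟨d, by rw [← hq]; try ring⟩, hdq, ?_⟩
              have : PySem.Int.floordiv n q = d := pv_fd_exact n d q hq1 (by rw [← hq]; try ring)
              omega
          · exact Or.inr ⟨hv1, hdvd, by omega, by omega⟩
        · rintro (h | ⟨hv1, hdvd, hdv, hdfv⟩)
          · exact Or.inl (List.mem_append.2 (Or.inl (List.mem_append.2 (Or.inl h))))
          · have hfv : PySem.Int.floordiv n v * v = n :=
              pv_mul_fd n v ((PySem.Int.mod_eq_zero_iff_dvd n v).2 hdvd)
            by_cases hvd : v = d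
            · exact Or.inl (List.mem_append.2 (Or.inl (List.mem_append.2 (Or.inr (by simp [hvd])))))
            by_cases hvq : v = q
            · have hne : d ≠ q := fun h => hvd (by omega)
              refine Or.inl (List.mem_append.2 (Or.inr ?_))
              rw [if_pos hne]
              simp [hvq]
            · have hne : PySem.Int.floordiv n v ≠ d := by
                intro heq
                have : PySem.Int.floordiv n d = v :=
                  pv_fd_exact n v d (by omega) (by rw [← hfv, heq]; ring)
                exact hvq (by omega)
              exact Or.inr ⟨hv1, hdvd, by omega, by omega⟩
      · rw [if_neg hmod]
        have hnd : ¬ (d ∣ n) := fun h => hmod ((PySem.Int.mod_eq_zero_iff_dvd n d).2 h)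
        constructor
        · rintro (h | ⟨hv1, hdvd, hdv, hdfv⟩)
          · exact Or.inl h
          · exact Or.inr ⟨hv1, hdvd, by omega, by omega⟩
        · rintro (h | ⟨hv1, hdvd, hdv, hdfv⟩)
          · exact Or.inl h
          · have hfv : PySem.Int.floordiv n v * v = n :=
              pv_mul_fd n v ((PySem.Int.mod_eq_zero_iff_dvd n v).2 hdvd)
            have hvd : v ≠ d := fun h => hnd (h ▸ hdvd)
            have hfd : PySem.Int.floordiv n v ≠ d := by
              intro heq
              exact hnd ⟨v, by rw [← hfv, heq]⟩
            exact Or.inr ⟨hv1, hdvd, by omega, by omega⟩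
    · rw [if_neg hdd]
      constructor
      · exact Or.inl
      · rintro (h | ⟨hv1, hdvd, hdv, hdfv⟩)
        · exact h
        · exfalso
          have hfv : PySem.Int.floordiv n v * v = n :=
            pv_mul_fd n v ((PySem.Int.mod_eq_zero_iff_dvd n v).2 hdvd)
          nlinarith

lemma divLoop_count_one (n : Int) :
    ∀ (f : Nat) (d : Int) (acc : List Int), 2 ≤ d →
      (divLoop n f d acc).count 1 = acc.count 1 := by
  intro f
  induction f with
  | zero => intro d acc _; simp [divLoop]
  | succ f ih =>
    intro d acc hd
    rw [divLoop]
    by_cases hdd : d * d ≤ n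
    · rw [if_pos hdd, ih (d + 1) _ (by omega)]
      by_cases hmod : PySem.Int.mod n d = 0
      · have hq : PySem.Int.floordiv n d * d = n := pv_mul_fd n d hmod
        have hd1 : d ≠ 1 := by omega
        have hq1 : PySem.Int.floordiv n d ≠ 1 := by intro h; rw [h] at hq; nlinarith
        rw [if_pos hmod]
        split_ifs <;> simp [List.count_append, List.count_eq_zero] <;> omega
      · rw [if_neg hmod]
    · rw [if_neg hdd]

lemma foldB_inv (steps : List Int) (n : Int) (h0 : (0 : Int) ∉ steps)
    (h1 : (1 : Int) ∉ steps) :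
    ∀ (L : List Int) (memo : PySem.Dict Int (List (List Int))),
      (∀ v ∈ L, 2 ≤ v ∧ v ∣ n) →
      L.Pairwise (· ≤ ·) →
      (∀ u : Int, 1 ≤ u → u ∣ n → u ∉ L → goA steps u.toNat u = some (memo.getD u [])) →
      ∀ u : Int, 1 ≤ u → u ∣ n →
        goA steps u.toNat u =
          some ((L.foldl (fun memo v => memo.insert v (bInner steps memo v)) memo).getD u []) := by
  intro L
  induction L with
  | nil =>
    intro memo _ _ hmemo u hu hdvd
    exact hmemo u hu hdvd (by simp)
  | cons v rest ih =>
    intro memo hL hpw hmemo u hu hdvd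
    have hv2 : 2 ≤ v := (hL v (by simp)).1
    have hvn : v ∣ n := (hL v (by simp)).2
    have hrest : ∀ r ∈ rest, v ≤ r := (List.pairwise_cons.1 hpw).1
    -- the value B computes for v is exactly A's value at v
    have hval : goA steps v.toNat v = some (bInner steps memo v) := by
      obtain ⟨t, ht⟩ : ∃ t, v.toNat = t + 1 := ⟨v.toNat - 1, by omega⟩
      rw [ht, goA_ge_two steps t v hv2, bInner_eq]
      congr 1
      apply List.flatMap_congr
      intro step hstep
      unfold gA gB
      by_cases hmod : PySem.Int.mod v step = 0
      · have hs0 : step ≠ 0 := fun h => h0 (h ▸ hstep)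
        have hs1 : step ≠ 1 := fun h => h1 (h ▸ hstep)
        have hne' : ¬ PySem.Int.mod v step ≠ 0 := by simp [hmod]
        rcases (by omega : step ≤ -1 ∨ 2 ≤ step) with hneg | hpos
        · have hc : ¬(2 ≤ step ∧ PySem.Int.mod v step = 0) := fun h => by omega
          rw [goA_none_of_lt steps t _ (pv_fd_lt_one_of_neg v step hv2 hneg), if_neg hc]
          simp [hmod]
        · have hq : PySem.Int.floordiv v step * step = v := pv_mul_fd v step hmod
          have hq1 : 1 ≤ PySem.Int.floordiv v step := by nlinarith
          have hqv : PySem.Int.floordiv v step < v := by nlinarith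
          have hqn : PySem.Int.floordiv v step ∣ n :=
            dvd_trans ⟨step, hq.symm⟩ hvn
          have hqout : PySem.Int.floordiv v step ∉ v :: rest := by
            intro hmem
            rcases List.mem_cons.1 hmem with heq | hmem'
            · omega
            · exact absurd (hrest _ hmem') (by omega)
          have hrec : goA steps (PySem.Int.floordiv v step).toNat (PySem.Int.floordiv v step)
              = some (memo.getD (PySem.Int.floordiv v step) []) := hmemo _ hq1 hqn hqout
          have hfuel : goA steps t (PySem.Int.floordiv v step)
              = goA steps (PySem.Int.floordiv v step).toNat (PySem.Int.floordiv v step) :=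
            goA_fuel steps h0 h1 t _ (by omega) t _ (by omega) (le_refl _)
          rw [if_neg hne', hfuel, hrec,
            if_pos (⟨hpos, hmod⟩ : 2 ≤ step ∧ PySem.Int.mod v step = 0)]
          apply List.map_congr_left
          intro p hp
          rw [goA_last steps _ _ _ hrec p hp, hq]
      · simp [hmod]
    refine ih (memo.insert v (bInner steps memo v)) (fun r hr => hL r (by simp [hr]))
      (List.pairwise_cons.1 hpw).2 ?_ u hu hdvd
    intro w hw hwdvd hwout
    rw [PySem.Dict.getD_insert]
    by_cases hwv : w = v
    · subst hwv; rw [if_pos rfl]; exact hval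
    · rw [if_neg hwv]
      exact hmemo w hw hwdvd (by simp [hwv, hwout])

-- ===== VERDICT (by name: the statement is the Claim_ definition above) =====
theorem get_all_feasible_strucutre_spec : Claim_equal_get_all_feasible_strucutre := by
  intro m steps hDom hPre
  unfold Spec_get_all_feasible_strucutre get_all_feasible_strucutre get_all_feasible_strucutre_alt
  by_cases hm1 : m < 1
  · rw [goA_none_of_lt steps _ m hm1, if_pos hm1]
  by_cases hm2 : m = 1
  · subst hm2; rw [goA_one]; norm_num
  · have hm : 2 ≤ m := by omega
    obtain ⟨h0, h1⟩ : (0 : Int) ∉ steps ∧ (1 : Int) ∉ steps := by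
      rcases hPre with h | h
      · omega
      · exact h
    rw [if_neg hm1, if_neg hm2]
    set S := PySem.List.sorted (divLoop m m.toNat 1 []) (fun x => x) false with hS
    have hmemDL : ∀ v : Int, v ∈ divLoop m m.toNat 1 [] ↔ 1 ≤ v ∧ v ∣ m := by
      intro v
      rw [divLoop_mem m hm m.toNat 1 [] (by omega) (by omega)]
      constructor
      · rintro (h | ⟨ha, hb, -, -⟩)
        · simp at h
        · exact ⟨ha, hb⟩
      · rintro ⟨hv1, hdvd⟩
        refine Or.inr ⟨hv1, hdvd, hv1, ?_⟩
        have hvm : v ≤ m := Int.le_of_dvd (by omega) hdvd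
        have := (PySem.Int.le_floordiv_iff_mul_le (a := m) (b := v) (q := 1) (by omega)).2
          (by omega)
        omega
    have h1S : (1 : Int) ∈ S := by
      rw [hS, PySem.List.mem_sorted]
      exact (hmemDL 1).2 ⟨le_refl 1, one_dvd m⟩
    obtain ⟨a, rest, hcons⟩ : ∃ a rest, S = a :: rest := by
      cases hSc : S with
      | nil => rw [hSc] at h1S; simp at h1S
      | cons a r => exact ⟨a, r, rfl⟩
    have ha1 : a = 1 := by
      have hle := PySem.List.key_head_sorted_le _ _ (hS.symm.trans hcons)
      have ha_mem : a ∈ divLoop m m.toNat 1 [] := by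
        rw [← PySem.List.mem_sorted (key := fun x => x) (rev := false), ← hS, hcons]
        simp
      have ha1' := ((hmemDL a).1 ha_mem).1
      have hle1 := hle 1 ((hmemDL 1).2 ⟨le_refl 1, one_dvd m⟩)
      simp only [] at hle1
      omega
    subst ha1
    have hDLcount : (divLoop m m.toNat 1 []).count 1 = 1 := by
      obtain ⟨t, ht⟩ : ∃ t, m.toNat = t + 1 := ⟨m.toNat - 1, by omega⟩
      rw [ht, divLoop]
      have hmod1 : PySem.Int.mod m 1 = 0 := (PySem.Int.mod_eq_zero_iff_dvd m 1).2 (one_dvd m)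
      have hfd1 : PySem.Int.floordiv m 1 = m := pv_fd_exact m m 1 (le_refl 1) (by ring)
      rw [if_pos (by nlinarith : (1 : Int) * 1 ≤ m), if_pos hmod1,
        if_pos (by rw [hfd1]; omega : (1 : Int) ≠ PySem.Int.floordiv m 1),
        divLoop_count_one m t (1 + 1) _ (by omega), hfd1]
      simp [List.count_cons]
      omega
    have h1rest : (1 : Int) ∉ rest := by
      have hc : List.count 1 S = 1 := by
        rw [hS, List.Perm.count_eq (PySem.List.sorted_perm _ _ _), hDLcount]
      rw [hcons] at hc
      simp at hc
      exact List.count_eq_zero.1 hc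
    have hpwS : S.Pairwise (· ≤ ·) := by
      rw [hS]
      exact PySem.List.sorted_pairwise _ _
    have hrest_facts : ∀ r ∈ rest, 2 ≤ r ∧ r ∣ m := by
      intro r hr
      have hrDL : r ∈ divLoop m m.toNat 1 [] := by
        rw [← PySem.List.mem_sorted (key := fun x => x) (rev := false), ← hS, hcons]
        simp [hr]
      have := (hmemDL r).1 hrDL
      have hr1 : r ≠ 1 := fun h => h1rest (h ▸ hr)
      exact ⟨by omega, this.2⟩
    have hinit : ∀ u : Int, 1 ≤ u → u ∣ m → u ∉ rest →
        goA steps u.toNat u = some ((PySem.Dict.ofList [((1:Int), [[(1:Int)]])]).getD u []) := by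
      intro u hu hdvd hnotin
      have huS : u ∈ S := by
        rw [hS, PySem.List.mem_sorted]
        exact (hmemDL u).2 ⟨hu, hdvd⟩
      rw [hcons] at huS
      rcases List.mem_cons.1 huS with rfl | hmem
      · rw [goA_one]; rfl
      · exact absurd hmem hnotin
    have main := foldB_inv steps m h0 h1 rest (PySem.Dict.ofList [((1:Int), [[(1:Int)]])])
      hrest_facts (List.pairwise_cons.1 (hcons ▸ hpwS)).2 hinit m (by omega) dvd_rfl
    show goA steps m.toNat m =
      some ((List.foldl (fun memo v => memo.insert v (bInner steps memo v))
        (PySem.Dict.ofList [(1, [[1]])]) (PySem.List.slice S (some 1))).getD m [])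
    rw [PySem.List.slice_from_one, hcons]
    exact main
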